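-- pv_equiv track=rewrite | github.com/rvilim/aoc2024 | 09/main.py | find_free_blocks
-- ===== SOURCE A (Python) =====
-- def find_free_blocks(disk, min_length):
--     i = 0
--     while i < len(disk):
--         if disk[i] == '.':
--             start = i
--             while i < len(disk) and disk[i] == '.':
--                 i += 1
--             if i-start >= min_length:
--                 return start
--         else:
--             i += 1
--     return None
-- ===== SOURCE B (Python) =====
-- def find_free_blocks(disk, min_length):
--     run = 0
--     for i, block in enumerate(disk):
--         if block == '.':
--             run += 1
--             if run >= min_length:
--                 return i - run + 1
--         else:
--             run = 0
--     return None
-- ===== Notes on version B (the rewrite author's own statement) =====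
-- stated objective: simpler
-- what changed: Replaces A's nested loops (outer scan plus an inner run-consuming while with an explicit start/length check) by a single enumerate pass keeping a running count of consecutive dots, returning i - run + 1 the first time the count reaches min_length; one loop with no re-indexing gives a constant-factor speedup.
import Mathlib
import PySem

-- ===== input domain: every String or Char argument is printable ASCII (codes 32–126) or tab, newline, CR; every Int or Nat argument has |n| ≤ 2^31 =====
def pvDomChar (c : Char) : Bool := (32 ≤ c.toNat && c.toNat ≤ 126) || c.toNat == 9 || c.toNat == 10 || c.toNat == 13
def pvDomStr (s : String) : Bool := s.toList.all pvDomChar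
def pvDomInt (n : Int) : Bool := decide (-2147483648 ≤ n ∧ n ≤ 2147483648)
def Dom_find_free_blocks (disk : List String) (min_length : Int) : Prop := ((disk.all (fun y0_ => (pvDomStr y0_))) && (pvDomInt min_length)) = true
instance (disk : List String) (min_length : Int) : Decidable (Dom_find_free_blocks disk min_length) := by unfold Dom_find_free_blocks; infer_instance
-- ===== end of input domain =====

-- B replaces A's nested loops by one pass with a running count of consecutive '.' entries (simpler).

-- ===== PORT A =====
-- inner `while i < len(disk) and disk[i] == '.': i += 1` (disk[i] via getD; the `i < len` guard makes it exact)
def pvAInner (disk : List String) (i : Nat) : Nat :=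
  if i < disk.length ∧ disk.getD i "" = "." then pvAInner disk (i + 1) else i
termination_by disk.length - i
decreasing_by omega

-- termination fact for the outer loop: the inner while strictly advances when it is entered
theorem pvAInner_ge (disk : List String) (i : Nat) : i ≤ pvAInner disk i := by
  fun_induction pvAInner disk i with
  | case1 i h ih => omega
  | case2 i h => omega

-- outer `while i < len(disk)` of A
def pvAOuter (disk : List String) (min_length : Int) (i : Nat) : Option Int :=
  if i < disk.length then
    if disk.getD i "" = "." then
      -- start = i; run the inner while; check run length
      if (pvAInner disk i : Int) - (i : Int) ≥ min_length then some (i : Int)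
      else pvAOuter disk min_length (pvAInner disk i)
    else pvAOuter disk min_length (i + 1)
  else none
termination_by disk.length - i
decreasing_by
  · have h1 : i + 1 ≤ pvAInner disk (i + 1) := pvAInner_ge disk (i + 1)
    have h2 : pvAInner disk i = pvAInner disk (i + 1) := by
      rw [pvAInner]; simp_all
    omega
  · omega

def find_free_blocks (disk : List String) (min_length : Int) : Option Int :=
  pvAOuter disk min_length 0

-- ===== PORT B =====
-- single pass: `for i, block in enumerate(disk)` with running count of consecutive dots
def pvBGo (min_length : Int) (run : Nat) (i : Nat) : List String → Option Int
  | [] => none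
  | block :: rest =>
    if block = "." then
      if ((run + 1 : Nat) : Int) ≥ min_length then some ((i : Int) - ((run + 1 : Nat) : Int) + 1)
      else pvBGo min_length (run + 1) (i + 1) rest
    else pvBGo min_length 0 (i + 1) rest

def find_free_blocks_alt (disk : List String) (min_length : Int) : Option Int :=
  pvBGo min_length 0 0 disk

-- ===== PRECONDITION & SPEC =====
def Spec_find_free_blocks (disk : List String) (min_length : Int) (out : Option Int) : Prop := out = find_free_blocks_alt disk min_length
instance (disk : List String) (min_length : Int) (out : Option Int) : Decidable (Spec_find_free_blocks disk min_length out) := by unfold Spec_find_free_blocks; infer_instance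

-- ===== CLAIM (what is proved, stated in full; the proofs are below) =====
def Claim_equal_find_free_blocks : Prop := ∀ (disk : List String) (min_length : Int), Dom_find_free_blocks disk min_length → Spec_find_free_blocks disk min_length (find_free_blocks disk min_length)

-- ===== LEMMAS AND PROOFS =====

theorem pvAInner_exit (disk : List String) (i : Nat) :
    ¬ (pvAInner disk i < disk.length ∧ disk.getD (pvAInner disk i) "" = ".") := by
  fun_induction pvAInner disk i with
  | case1 i h ih => exact ih
  | case2 i h => exact h

theorem pvAInner_gt (disk : List String) (i : Nat)
    (h : i < disk.length ∧ disk.getD i "" = ".") : i < pvAInner disk i := by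
  rw [pvAInner, if_pos h]
  have := pvAInner_ge disk (i + 1)
  omega

-- key lemma: B's counter walks through the dot run that A's inner while consumes
theorem pvRun (disk : List String) (m : Int) :
    ∀ k i r, disk.length - i ≤ k → i < disk.length → disk.getD i "" = "." →
      pvBGo m r i (disk.drop i) =
        if (r : Int) + ((pvAInner disk i - i : Nat) : Int) ≥ m then some ((i : Int) - (r : Int))
        else pvBGo m (r + (pvAInner disk i - i)) (pvAInner disk i) (disk.drop (pvAInner disk i)) := by
  intro k
  induction k with
  | zero => intro i r hk hi _; omega
  | succ k ih =>
    intro i r hk hi hdot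
    have hdrop : disk.drop i = disk.getD i "" :: disk.drop (i + 1) := by
      rw [List.getD_eq_getElem disk "" hi, List.drop_eq_getElem_cons hi]
    have hgt := pvAInner_gt disk i ⟨hi, hdot⟩
    have hstep : pvAInner disk i = pvAInner disk (i + 1) := by
      rw [pvAInner, if_pos ⟨hi, hdot⟩]
    rw [hdrop, hdot, pvBGo, if_pos rfl]
    by_cases h1 : ((r + 1 : Nat) : Int) ≥ m
    · rw [if_pos h1, if_pos (by omega)]
      congr 1; push_cast; omega
    · rw [if_neg h1]
      by_cases h2 : i + 1 < disk.length ∧ disk.getD (i + 1) "" = "."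
      · have hge := pvAInner_ge disk (i + 1)
        rw [ih (i + 1) (r + 1) (by omega) h2.1 h2.2, hstep]
        have hcond : ((r + 1 : Nat) : Int) + ((pvAInner disk (i + 1) - (i + 1) : Nat) : Int) ≥ m
            ↔ (r : Int) + ((pvAInner disk (i + 1) - i : Nat) : Int) ≥ m := by
          push_cast [Nat.cast_sub hge, Nat.cast_sub (by omega : i ≤ pvAInner disk (i + 1))]
          omega
        split_ifs with ha hb hb
        · congr 1; push_cast; omega
        · exact absurd (hcond.mp ha) hb
        · exact absurd (hcond.mpr hb) ha
        · congr 1; omega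
      · have hj : pvAInner disk i = i + 1 := by
          rw [hstep, pvAInner, if_neg h2]
        rw [hj]
        have : ¬ ((r : Int) + ((i + 1 - i : Nat) : Int) ≥ m) := by
          simp only [Nat.add_sub_cancel_left]; push_cast at h1 ⊢; omega
        rw [if_neg this]
        congr 1
        omega

theorem pvMain (disk : List String) (m : Int) :
    ∀ k i, disk.length - i ≤ k → pvAOuter disk m i = pvBGo m 0 i (disk.drop i) := by
  intro k
  induction k with
  | zero =>
    intro i hk
    have hi : disk.length ≤ i := by omega
    rw [pvAOuter, if_neg (by omega), List.drop_eq_nil_of_le hi, pvBGo]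
  | succ k ih =>
    intro i hk
    by_cases hi : i < disk.length
    · have hdrop : disk.drop i = disk.getD i "" :: disk.drop (i + 1) := by
        rw [List.getD_eq_getElem disk "" hi, List.drop_eq_getElem_cons hi]
      by_cases hdot : disk.getD i "" = "."
      · have hgt := pvAInner_gt disk i ⟨hi, hdot⟩
        rw [pvAOuter, if_pos hi, if_pos hdot,
            pvRun disk m (k + 1) i 0 hk hi hdot]
        simp only [Nat.cast_zero, zero_add, sub_zero, Nat.cast_sub (le_of_lt hgt)]
        split_ifs with hc
        · simp
        · -- the inner while stopped at a non-dot position (or the end)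
          have hexit := pvAInner_exit disk i
          by_cases hjl : pvAInner disk i < disk.length
          · have hjd : disk.getD (pvAInner disk i) "" ≠ "." := fun h => hexit ⟨hjl, h⟩
            have hdropj : disk.drop (pvAInner disk i) =
                disk.getD (pvAInner disk i) "" :: disk.drop (pvAInner disk i + 1) := by
              rw [List.getD_eq_getElem disk "" hjl, List.drop_eq_getElem_cons hjl]
            rw [hdropj, pvBGo, if_neg hjd, pvAOuter, if_pos hjl, if_neg hjd]
            exact ih (pvAInner disk i + 1) (by omega)
          · rw [List.drop_eq_nil_of_le (by omega), pvBGo, pvAOuter, if_neg hjl]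
      · rw [pvAOuter, if_pos hi, if_neg hdot, hdrop, pvBGo, if_neg hdot]
        exact ih (i + 1) (by omega)
    · rw [pvAOuter, if_neg hi, List.drop_eq_nil_of_le (by omega), pvBGo]

-- ===== VERDICT (by name: the statement is the Claim_ definition above) =====
theorem find_free_blocks_spec : Claim_equal_find_free_blocks := by
  intro disk m _
  unfold Spec_find_free_blocks find_free_blocks find_free_blocks_alt
  simpa using pvMain disk m disk.length 0 (by omega)
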